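-- pv_equiv track=rewrite | github.com/MioZh/calculus | calcl.py | function_edit
-- ===== SOURCE A (Python) =====
-- def function_edit(f):
--     i = 0
--     s = ''
--     while i < len(f):
--         if f[i] == 'x':# ищем Х
--             if i != 0:  # проверяем не первый ли индекс у Х
--                 if f[i-1].isdigit(): # проверка число ли то что стоит перед Х
--                     s = s + '*' # добавляем перед Х умножение
--         if f[i] == 'p': # когда пользователь вводит лимиты может написать 2pi и опять же наш калькулятор это не понимает по этому испровляем на 2*pi
--             if i != 0:   # опять же проверяем не первый ли индекс у Pi
--                 if f[i-1].isdigit(): # проверка число ли то что стоит перед Pi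
--                     s = s + '*' # добавляем перед Pi умножение
--         s = s + f[i]
--         i = i + 1
--     return s
-- ===== SOURCE B (Python) =====
-- def function_edit(f):
--     # Stage 1: find all cut positions: an 'x' or 'p' directly preceded by a digit.
--     cuts = [i for i in range(1, len(f)) if f[i] in 'xp' and f[i - 1].isdigit()]
--     # Stage 2: split f at the cut positions and glue the pieces with '*'.
--     parts = []
--     prev = 0
--     for i in cuts:
--         parts.append(f[prev:i])
--         prev = i
--     parts.append(f[prev:])
--     return '*'.join(parts)
-- ===== Notes on version B (the rewrite author's own statement) =====
-- stated objective: faster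
-- what changed: Instead of scanning characters one by one and appending to a growing string, B first computes the list of cut positions (x/p preceded by a digit), then splits the string at those positions with slicing and glues the pieces with '*'.join.
import Mathlib
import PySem

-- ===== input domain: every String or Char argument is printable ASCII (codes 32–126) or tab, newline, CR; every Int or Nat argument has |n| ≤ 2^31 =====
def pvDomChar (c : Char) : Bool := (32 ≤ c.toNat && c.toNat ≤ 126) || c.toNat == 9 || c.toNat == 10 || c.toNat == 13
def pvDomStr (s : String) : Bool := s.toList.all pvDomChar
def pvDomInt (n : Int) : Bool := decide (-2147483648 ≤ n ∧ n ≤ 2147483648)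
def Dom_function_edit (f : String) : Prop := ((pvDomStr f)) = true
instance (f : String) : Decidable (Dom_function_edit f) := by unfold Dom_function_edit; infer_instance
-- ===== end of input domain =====

-- B replaces A's per-character while loop (quadratic string concatenation) by two stages:
-- compute the list of cut positions, then split the string there and join the pieces with '*'.

-- ===== PORT A =====
-- the while loop of A: i is the index, s the accumulated output (as List Char)
def pvLoopA (l : List Char) (i : Nat) (s : List Char) : List Char :=
  if i < l.length then
    let c := l.getD i ' '
    let s := if c = 'x' then
               (if i ≠ 0 then (if PySem.Chars.isdigit (l.getD (i-1) ' ') then s ++ ['*'] else s) else s)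
             else s
    let s := if c = 'p' then
               (if i ≠ 0 then (if PySem.Chars.isdigit (l.getD (i-1) ' ') then s ++ ['*'] else s) else s)
             else s
    pvLoopA l (i+1) (s ++ [c])
  else s
termination_by l.length - i

def function_edit (f : String) : String :=
  String.ofList (pvLoopA f.toList 0 [])

-- ===== PORT B =====
-- the condition of B's list comprehension: f[i] in 'xp' and f[i-1].isdigit()
def pvStar (l : List Char) (i : Nat) : Bool :=
  (l.getD i ' ' == 'x' || l.getD i ' ' == 'p') && PySem.Chars.isdigit (l.getD (i-1) ' ')

-- Python slice f[a:b]; exact for 0 ≤ a ≤ b (the only way B uses it)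
def pvSlice (l : List Char) (a b : Nat) : List Char := (l.drop a).take (b - a)

-- B's for-loop over cuts, building parts (the trailing f[prev:] included)
def pvParts (l : List Char) : List Nat → Nat → List (List Char)
  | [], prev => [pvSlice l prev l.length]
  | i :: rest, prev => pvSlice l prev i :: pvParts l rest i

-- '*'.join
def pvJoin : List (List Char) → List Char
  | [] => []
  | [a] => a
  | a :: b :: rest => a ++ '*' :: pvJoin (b :: rest)

def function_edit_alt (f : String) : String :=
  let l := f.toList
  -- range(1, len(f)) = List.range' 1 (len - 1)
  let cuts := (List.range' 1 (l.length - 1)).filter (pvStar l)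
  String.ofList (pvJoin (pvParts l cuts 0))

-- ===== PRECONDITION & SPEC =====
def Spec_function_edit (f : String) (out : String) : Prop := out = function_edit_alt f
instance (f : String) (out : String) : Decidable (Spec_function_edit f out) := by unfold Spec_function_edit; infer_instance

-- ===== CLAIM (what is proved, stated in full; the proofs are below) =====
def Claim_equal_function_edit : Prop := ∀ (f : String), Dom_function_edit f → Spec_function_edit f (function_edit f)

-- ===== LEMMAS AND PROOFS =====

-- common specification: per-index contribution to the output
def pvG (l : List Char) (i : Nat) : List Char :=
  if pvStar l i then ['*', l.getD i ' '] else [l.getD i ' ']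

theorem pvLoopA_eq (l : List Char) : ∀ (i : Nat) (s : List Char), 1 ≤ i →
    pvLoopA l i s = s ++ ((List.range' i (l.length - i)).map (pvG l)).flatten := by
  intro i s
  induction i, s using pvLoopA.induct l with
  | case1 i s hlt c s1 s2 ih =>
    intro hi
    have hne : i ≠ 0 := by omega
    simp only [s2, s1, c, dite_eq_ite, ne_eq, hne, not_false_eq_true, if_true] at ih
    rw [pvLoopA]
    simp only [hlt, if_pos, ne_eq, hne, not_false_eq_true]
    rw [ih (by omega)]
    have hr : List.range' i (l.length - i) = i :: List.range' (i+1) (l.length - (i+1)) := by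
      have : l.length - i = (l.length - (i+1)) + 1 := by omega
      rw [this, List.range'_succ]
    rw [hr]
    simp only [List.map_cons, List.flatten_cons, pvG, pvStar]
    by_cases hx : l.getD i ' ' = 'x' <;> by_cases hp : l.getD i ' ' = 'p' <;>
      by_cases hd : PySem.Chars.isdigit (l.getD (i-1) ' ') = true <;>
      simp_all
  | case2 i s h =>
    intro hi
    rw [pvLoopA]
    have : l.length - i = 0 := by omega
    simp [h, this]

theorem pvParts_ne_nil (l : List Char) (cs : List Nat) (prev : Nat) :
    pvParts l cs prev ≠ [] := by
  cases cs <;> simp [pvParts]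

theorem pvJoin_cons (a : List Char) (parts : List (List Char)) (h : parts ≠ []) :
    pvJoin (a :: parts) = a ++ '*' :: pvJoin parts := by
  cases parts with
  | nil => exact absurd rfl h
  | cons b r => rfl

theorem pvSlice_cons (l : List Char) (a b : Nat) (hab : a < b) (hal : a < l.length) :
    pvSlice l a b = l.getD a ' ' :: pvSlice l (a+1) b := by
  unfold pvSlice
  rw [List.drop_eq_getElem_cons hal]
  have : b - a = (b - (a+1)) + 1 := by omega
  rw [this, List.take_succ_cons, List.getD_eq_getElem?_getD, List.getElem?_eq_getElem hal]
  rfl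

theorem pvParts_shift (l : List Char) (cs : List Nat) (prev : Nat)
    (hp : prev < l.length) (hcs : ∀ i ∈ cs, prev < i) :
    pvJoin (pvParts l cs prev) = l.getD prev ' ' :: pvJoin (pvParts l cs (prev+1)) := by
  cases cs with
  | nil =>
    simp only [pvParts, pvJoin]
    exact pvSlice_cons l prev l.length hp hp
  | cons i rest =>
    have hi : prev < i := hcs i (by simp)
    simp only [pvParts]
    rw [pvJoin_cons _ _ (pvParts_ne_nil l rest i), pvJoin_cons _ _ (pvParts_ne_nil l rest i),
      pvSlice_cons l prev i hi hp]
    rfl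

theorem pvMain (l : List Char) : ∀ (m prev : Nat), prev + m = l.length → 0 < m →
    pvJoin (pvParts l ((List.range' (prev+1) (m-1)).filter (pvStar l)) prev)
      = l.getD prev ' ' :: ((List.range' (prev+1) (m-1)).map (pvG l)).flatten := by
  intro m
  induction m with
  | zero => intro prev _ h; omega
  | succ k ih =>
    intro prev hlen _
    have hp : prev < l.length := by omega
    cases k with
    | zero =>
      simp only [Nat.add_sub_cancel, List.range'_zero, List.filter_nil, List.map_nil,
        List.flatten_nil, pvParts, pvJoin]
      unfold pvSlice
      rw [List.drop_eq_getElem_cons hp]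
      have h2 : l.drop (prev+1) = [] := List.drop_eq_nil_of_le (by omega)
      have h3 : l.length - prev = 1 := by omega
      rw [h2, h3]
      simp [List.getD_eq_getElem?_getD, List.getElem?_eq_getElem hp]
    | succ j =>
      have hr : List.range' (prev+1) (j+1+1-1) = (prev+1) :: List.range' (prev+2) j := by
        rw [show j+1+1-1 = j+1 from rfl, List.range'_succ]
      rw [hr]
      have ih' := ih (prev+1) (by omega) (by omega)
      rw [show j + 1 - 1 = j from rfl] at ih'
      by_cases hs : pvStar l (prev+1) = true
      · rw [List.filter_cons_of_pos hs]
        simp only [pvParts]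
        rw [pvJoin_cons _ _ (pvParts_ne_nil l _ (prev+1)),
          pvSlice_cons l prev (prev+1) (by omega) hp]
        have hsl : pvSlice l (prev+1) (prev+1) = [] := by simp [pvSlice]
        rw [hsl, ih']
        simp [pvG, hs]
      · rw [List.filter_cons_of_neg (by simp_all)]
        rw [pvParts_shift l _ prev hp (by
          intro i hin
          have := (List.mem_range'_1.mp (List.mem_of_mem_filter hin)).1
          omega)]
        rw [ih']
        simp only [List.map_cons, List.flatten_cons, pvG, hs]
        simp

-- ===== VERDICT (by name: the statement is the Claim_ definition above) =====
theorem function_edit_spec : Claim_equal_function_edit := by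
  intro f _
  unfold Spec_function_edit function_edit function_edit_alt
  cases hn : f.toList.length with
  | zero =>
    have hl : f.toList = [] := List.eq_nil_of_length_eq_zero hn
    rw [pvLoopA]
    simp [hl, pvParts, pvJoin, pvSlice]
  | succ k =>
    rw [pvLoopA]
    rw [if_pos (show 0 < f.toList.length by omega)]
    simp only [ne_eq, not_true_eq_false, if_false, ite_self]
    rw [pvLoopA_eq _ _ _ (le_refl 1)]
    have hm := pvMain f.toList f.toList.length 0 (by omega) (by omega)
    simp only [Nat.zero_add] at hm
    rw [hm]
    simp
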